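-- pv_equiv track=rewrite | github.com/jgrogers/wordlebot | wordlebot.py | get_match_pattern
-- ===== SOURCE A (Python) =====
-- def get_match_pattern(word1, word2):
--     ans = 0
--     green = set()
--     green_word2 = set()
--     yellow_word2 = set()
--     for i in range(len(word1)):
--         #Get greens
--         if word1[i] == word2[i]:
--             green.add(i)
--             green_word2.add(i)
--             ans = ans | (2 << (2*(4-i)))
--     for i in range (len (word1)):
--         if i not in green:
--             yellow = False
--             for j in range(len(word2)):
--                 if j not in green_word2 and j not in yellow_word2:
--                     if word1[i] == word2[j]:
--                         yellow_word2.add(j)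
--                         yellow = True
--                         break
--             if yellow:
--                 ans = ans | 1 << (2*(4-i))
--     return ans
-- ===== SOURCE B (Python) =====
-- def get_match_pattern(word1, word2):
--     ans = 0
--     green = set()
--     for i in range(len(word1)):
--         if word1[i] == word2[i]:
--             green.add(i)
--             ans |= 2 << (2 * (4 - i))
--     remaining = {}
--     for j in range(len(word2)):
--         if j not in green:
--             c = word2[j]
--             remaining[c] = remaining.get(c, 0) + 1
--     for i in range(len(word1)):
--         if i not in green and remaining.get(word1[i], 0) > 0:
--             remaining[word1[i]] -= 1
--             ans |= 1 << (2 * (4 - i))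
--     return ans
-- ===== Notes on version B (the rewrite author's own statement) =====
-- stated objective: alternative
-- what changed: A rescans word2 (tracking a consumed-position set) for every non-green letter of word1; B builds a remaining-letter count dict over the non-green positions of word2 once and awards a yellow by decrementing that count.
-- outside the precondition, e.g. on get_match_pattern('abcdeg', 'zzzzzz'): A returns 0, B returns 0
import Mathlib
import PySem

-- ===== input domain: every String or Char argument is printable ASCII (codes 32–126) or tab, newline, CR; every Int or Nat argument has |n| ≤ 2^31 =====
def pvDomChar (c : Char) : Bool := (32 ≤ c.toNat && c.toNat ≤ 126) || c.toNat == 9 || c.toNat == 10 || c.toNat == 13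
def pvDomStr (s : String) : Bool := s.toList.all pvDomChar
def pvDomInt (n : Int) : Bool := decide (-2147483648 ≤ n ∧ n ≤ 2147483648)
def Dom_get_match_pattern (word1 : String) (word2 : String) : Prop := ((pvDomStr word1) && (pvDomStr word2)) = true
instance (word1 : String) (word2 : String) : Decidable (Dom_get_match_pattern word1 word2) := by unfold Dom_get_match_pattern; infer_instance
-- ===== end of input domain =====

-- B replaces A's rescan of word2 for every yellow candidate by a remaining-letter count dict
-- built once over the non-green positions of word2 (objective: alternative bookkeeping; same
-- result because A's inner scan succeeds iff a non-green, not-yet-consumed occurrence of the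
-- letter remains, regardless of WHICH position it consumes).

-- ===== PORT A =====
def get_match_pattern (word1 : String) (word2 : String) : Int :=
  let w1 := word1.toList
  let w2 := word2.toList
  -- first loop: greens (ans, green, green_word2)
  let st1 := (List.range w1.length).foldl
    (fun (st : Int × List Nat × List Nat) i =>
      if w1.getD i ' ' = w2.getD i ' ' then
        (PySem.Int.bor st.1 ((2 : Int) <<< (2 * (4 - i))), PySem.Set.add st.2.1 i, PySem.Set.add st.2.2 i)
      else st)
    (0, PySem.Set.empty, PySem.Set.empty)
  -- second loop: yellows, consuming positions of word2 into yellow_word2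
  let st2 := (List.range w1.length).foldl
    (fun (st : Int × List Nat) i =>
      if PySem.Set.contains st1.2.1 i then st
      else
        match (List.range w2.length).find?
            (fun j => !(PySem.Set.contains st1.2.2 j) && !(PySem.Set.contains st.2 j)
                      && (w1.getD i ' ' == w2.getD j ' ')) with
        | some j => (PySem.Int.bor st.1 ((1 : Int) <<< (2 * (4 - i))), PySem.Set.add st.2 j)
        | none => st)
    (st1.1, PySem.Set.empty)
  st2.1

-- ===== PORT B =====
def get_match_pattern_alt (word1 : String) (word2 : String) : Int :=
  let w1 := word1.toList
  let w2 := word2.toList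
  -- greens
  let st1 := (List.range w1.length).foldl
    (fun (st : Int × List Nat) i =>
      if w1.getD i ' ' = w2.getD i ' ' then
        (PySem.Int.bor st.1 ((2 : Int) <<< (2 * (4 - i))), PySem.Set.add st.2 i)
      else st)
    (0, PySem.Set.empty)
  -- remaining-letter counts of word2 at non-green positions
  let rem0 := (List.range w2.length).foldl
    (fun (d : PySem.Dict Char Int) j =>
      if PySem.Set.contains st1.2 j then d
      else d.insert (w2.getD j ' ') (d.getD (w2.getD j ' ') 0 + 1))
    PySem.Dict.empty
  -- yellows by decrementing the count
  let st2 := (List.range w1.length).foldl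
    (fun (st : Int × PySem.Dict Char Int) i =>
      if !(PySem.Set.contains st1.2 i) && decide (0 < st.2.getD (w1.getD i ' ') 0) then
        (PySem.Int.bor st.1 ((1 : Int) <<< (2 * (4 - i))),
         st.2.insert (w1.getD i ' ') (st.2.getD (w1.getD i ' ') 0 - 1))
      else st)
    (st1.1, rem0)
  st2.1

-- ===== PRECONDITION & SPEC =====
-- Pre_ excludes (a) word1 longer than word2, where A raises IndexError reading word2[i], and
-- (b) word1 longer than 5 letters, where the Wordle bit encoding 2*(4-i) goes negative: A then
-- raises ValueError (negative shift) whenever a green or yellow occurs at position ≥ 5, and on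
-- the remaining long inputs the value is outside the encoding's intended 5-letter domain.
def Pre_get_match_pattern (word1 : String) (word2 : String) : Prop :=
  word1.length ≤ word2.length ∧ word1.length ≤ 5
instance (word1 : String) (word2 : String) : Decidable (Pre_get_match_pattern word1 word2) := by
  unfold Pre_get_match_pattern; infer_instance

def pvWitness_get_match_pattern : String × String := ("crane", "brake")

def Spec_get_match_pattern (word1 : String) (word2 : String) (out : Int) : Prop :=
  out = get_match_pattern_alt word1 word2
instance (word1 : String) (word2 : String) (out : Int) : Decidable (Spec_get_match_pattern word1 word2 out) := by
  unfold Spec_get_match_pattern; infer_instance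

-- ===== CLAIM (what is proved, stated in full; the proofs are below) =====
def Claim_equal_get_match_pattern : Prop := ∀ (word1 : String) (word2 : String), Dom_get_match_pattern word1 word2 → Pre_get_match_pattern word1 word2 → Spec_get_match_pattern word1 word2 (get_match_pattern word1 word2)

-- ===== LEMMAS AND PROOFS =====

-- available (non-green, unconsumed) occurrences of letter c in word2
def pvAvail (w2 : List Char) (g yw : List Nat) (c : Char) : Nat :=
  ((List.range w2.length).filter
    (fun j => !(PySem.Set.contains g j) && !(PySem.Set.contains yw j) && (c == w2.getD j ' '))).length

-- phase 1 of A carries (green, green_word2) as two copies of B's green set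
theorem pv_phase1 (w1 w2 : List Char) (l : List Nat) (a : Int) (s : List Nat) :
    l.foldl (fun (st : Int × List Nat × List Nat) i =>
      if w1.getD i ' ' = w2.getD i ' ' then
        (PySem.Int.bor st.1 ((2 : Int) <<< (2 * (4 - i))), PySem.Set.add st.2.1 i, PySem.Set.add st.2.2 i)
      else st) (a, s, s)
    = ((l.foldl (fun (st : Int × List Nat) i =>
        if w1.getD i ' ' = w2.getD i ' ' then
          (PySem.Int.bor st.1 ((2 : Int) <<< (2 * (4 - i))), PySem.Set.add st.2 i)
        else st) (a, s)).1,
       (l.foldl (fun (st : Int × List Nat) i =>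
        if w1.getD i ' ' = w2.getD i ' ' then
          (PySem.Int.bor st.1 ((2 : Int) <<< (2 * (4 - i))), PySem.Set.add st.2 i)
        else st) (a, s)).2,
       (l.foldl (fun (st : Int × List Nat) i =>
        if w1.getD i ' ' = w2.getD i ' ' then
          (PySem.Int.bor st.1 ((2 : Int) <<< (2 * (4 - i))), PySem.Set.add st.2 i)
        else st) (a, s)).2) := by
  induction l generalizing a s with
  | nil => rfl
  | cons i l ih =>
      simp only [List.foldl_cons]
      by_cases h : w1.getD i ' ' = w2.getD i ' '
      · rw [if_pos h, if_pos h]; exact ih _ _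
      · rw [if_neg h, if_neg h]; exact ih _ _

-- the remaining-letter dict built by B counts the non-green occurrences
theorem pv_build (w2 : List Char) (g : List Nat) (l : List Nat) (d : PySem.Dict Char Int) (c : Char) :
    (l.foldl (fun (d : PySem.Dict Char Int) j =>
        if PySem.Set.contains g j then d
        else d.insert (w2.getD j ' ') (d.getD (w2.getD j ' ') 0 + 1)) d).getD c 0
    = d.getD c 0 + ((l.filter (fun j => !(PySem.Set.contains g j) && (c == w2.getD j ' '))).length : Int) := by
  induction l generalizing d with
  | nil => simp
  | cons j l ih =>
      rw [List.foldl_cons, List.filter_cons]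
      by_cases hg : PySem.Set.contains g j = true
      · have hp : (!PySem.Set.contains g j && (c == w2.getD j ' ')) = false := by
          rw [hg]; rfl
        rw [if_pos hg, hp, if_neg (by simp), ih]
      · have hg' : PySem.Set.contains g j = false := by
          cases h : PySem.Set.contains g j
          · rfl
          · exact absurd h hg
        rw [if_neg hg, ih]
        by_cases hc : c = w2.getD j ' '
        · have hp : (!PySem.Set.contains g j && (c == w2.getD j ' ')) = true := by
            rw [hg']; simp only [Bool.not_false, Bool.true_and]; exact beq_iff_eq.mpr hc
          rw [hp, if_pos rfl, PySem.Dict.getD_insert, if_pos hc, List.length_cons, hc]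
          push_cast
          ring
        · have hp : (!PySem.Set.contains g j && (c == w2.getD j ' ')) = false := by
            rw [hg']; simp only [Bool.not_false, Bool.true_and]
            exact beq_eq_false_iff_ne.mpr hc
          rw [hp, if_neg (by simp), PySem.Dict.getD_insert, if_neg hc]

-- removing one counted position decrements the count by one
theorem pv_filter_erase {l : List Nat} {p : Nat → Bool} {j : Nat}
    (hnd : l.Nodup) (hmem : j ∈ l) (hpj : p j = true) :
    ((l.filter (fun x => p x && !(x == j))).length : Int)
      = ((l.filter p).length : Int) - 1 := by
  have h1 : l.filter (fun x => p x && !(x == j)) = (l.filter p).filter (fun x => !(x == j)) := by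
    simp [List.filter_filter, Bool.and_comm]
  have hnd2 : (l.filter p).Nodup := hnd.filter _
  have hj2 : j ∈ l.filter p := List.mem_filter.mpr ⟨hmem, hpj⟩
  have h2 : (l.filter p).filter (fun x => !(x == j)) = (l.filter p).erase j := by
    rw [hnd2.erase_eq_filter]
    apply List.filter_congr
    intro x _
    simp [bne]
  have h3 : ((l.filter p).erase j).length = (l.filter p).length - 1 :=
    List.length_erase_of_mem hj2
  have h4 : 0 < (l.filter p).length := List.length_pos_of_mem hj2
  rw [h1, h2]
  omega

-- phase 2: A's greedy scan over word2 and B's counter decrement produce the same answer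
theorem pv_phase2 (w1 w2 : List Char) (g : List Nat) (l : List Nat)
    (ansA ansB : Int) (yw : List Nat) (d : PySem.Dict Char Int)
    (hans : ansA = ansB)
    (hinv : ∀ c, d.getD c 0 = (pvAvail w2 g yw c : Int)) :
    (l.foldl (fun (st : Int × List Nat) i =>
      if PySem.Set.contains g i then st
      else
        match (List.range w2.length).find?
            (fun j => !(PySem.Set.contains g j) && !(PySem.Set.contains st.2 j)
                      && (w1.getD i ' ' == w2.getD j ' ')) with
        | some j => (PySem.Int.bor st.1 ((1 : Int) <<< (2 * (4 - i))), PySem.Set.add st.2 j)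
        | none => st) (ansA, yw)).1
    = (l.foldl (fun (st : Int × PySem.Dict Char Int) i =>
      if !(PySem.Set.contains g i) && decide (0 < st.2.getD (w1.getD i ' ') 0) then
        (PySem.Int.bor st.1 ((1 : Int) <<< (2 * (4 - i))),
         st.2.insert (w1.getD i ' ') (st.2.getD (w1.getD i ' ') 0 - 1))
      else st) (ansB, d)).1 := by
  induction l generalizing ansA ansB yw d with
  | nil => simpa using hans
  | cons i l ih =>
      simp only [List.foldl_cons]
      by_cases hg : PySem.Set.contains g i = true
      · have hcB : (!PySem.Set.contains g i && decide (0 < d.getD (w1.getD i ' ') 0)) = false := by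
          rw [hg]; rfl
        rw [if_pos hg, if_neg (by rw [hcB]; exact Bool.false_ne_true)]
        exact ih _ _ _ _ hans hinv
      · have hg' : PySem.Set.contains g i = false := by
          cases h : PySem.Set.contains g i
          · rfl
          · exact absurd h hg
        cases hf : (List.range w2.length).find?
            (fun j => !(PySem.Set.contains g j) && !(PySem.Set.contains yw j)
                      && (w1.getD i ' ' == w2.getD j ' ')) with
        | none =>
            have hz : pvAvail w2 g yw (w1.getD i ' ') = 0 := by
              unfold pvAvail
              rw [List.length_eq_zero_iff, List.filter_eq_nil_iff]
              intro j hj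
              exact List.find?_eq_none.mp hf j hj
            have hd0 : d.getD (w1.getD i ' ') 0 = 0 := by rw [hinv, hz]; rfl
            have hcB : (!PySem.Set.contains g i && decide (0 < d.getD (w1.getD i ' ') 0)) = false := by
              rw [hd0]; simp
            rw [if_neg hg, if_neg (by rw [hcB]; exact Bool.false_ne_true)]
            exact ih _ _ _ _ hans hinv
        | some j =>
            have hpj := List.find?_some hf
            have hjmem := List.mem_of_find?_eq_some hf
            simp only [Bool.and_eq_true, Bool.not_eq_true'] at hpj
            obtain ⟨⟨hjg, hjyw⟩, hjc⟩ := hpj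
            have hjc' : w2.getD j ' ' = w1.getD i ' ' := (beq_iff_eq.mp hjc).symm
            have hjfil : j ∈ (List.range w2.length).filter
                (fun j => !(PySem.Set.contains g j) && !(PySem.Set.contains yw j)
                          && (w1.getD i ' ' == w2.getD j ' ')) :=
              List.mem_filter.mpr ⟨hjmem, by rw [hjg, hjyw, hjc]; rfl⟩
            have hpos : 0 < pvAvail w2 g yw (w1.getD i ' ') := by
              unfold pvAvail; exact List.length_pos_of_mem hjfil
            have hdpos : 0 < d.getD (w1.getD i ' ') 0 := by
              rw [hinv]; exact_mod_cast hpos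
            have hcB : (!PySem.Set.contains g i && decide (0 < d.getD (w1.getD i ' ') 0)) = true := by
              rw [hg']
              simp only [Bool.not_false, Bool.true_and, decide_eq_true_eq]
              exact hdpos
            rw [if_neg hg, if_pos hcB]
            apply ih
            · rw [hans]
            · intro c'
              by_cases hcc : c' = w1.getD i ' '
              · subst hcc
                rw [PySem.Dict.getD_insert, if_pos rfl, hinv]
                unfold pvAvail
                have hcong : (List.range w2.length).filter
                    (fun x => !(PySem.Set.contains g x) && !(PySem.Set.contains (PySem.Set.add yw j) x)
                              && (w1.getD i ' ' == w2.getD x ' '))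
                    = (List.range w2.length).filter
                    (fun x => (!(PySem.Set.contains g x) && !(PySem.Set.contains yw x)
                              && (w1.getD i ' ' == w2.getD x ' ')) && !(x == j)) := by
                  apply List.filter_congr
                  intro x _
                  rw [PySem.Set.contains_eq_decide (s := PySem.Set.add yw j),
                      PySem.Set.contains_eq_decide (s := yw),
                      PySem.Set.contains_eq_decide (s := g)]
                  simp only [PySem.Set.mem_add]
                  by_cases hx : x = j
                  · subst hx; simp
                  · by_cases h2 : x ∈ yw <;> simp [hx, h2]
                rw [hcong, pv_filter_erase (List.nodup_range) hjmem
                      (by rw [hjg, hjyw, hjc]; rfl)]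
              · rw [PySem.Dict.getD_insert, if_neg hcc, hinv]
                unfold pvAvail
                congr 2
                apply List.filter_congr
                intro x _
                by_cases hx : x = j
                · subst hx
                  have hb : (c' == w2.getD x ' ') = false := by
                    rw [hjc']
                    exact beq_eq_false_iff_ne.mpr hcc
                  rw [hb]
                  simp
                · rw [PySem.Set.contains_eq_decide (s := PySem.Set.add yw j),
                      PySem.Set.contains_eq_decide (s := yw)]
                  simp only [PySem.Set.mem_add]
                  simp [hx]

-- initial invariant: the freshly built dict counts availability with nothing consumed
theorem pv_init (w2 : List Char) (g : List Nat) (c : Char) :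
    ((List.range w2.length).foldl (fun (d : PySem.Dict Char Int) j =>
        if PySem.Set.contains g j then d
        else d.insert (w2.getD j ' ') (d.getD (w2.getD j ' ') 0 + 1)) PySem.Dict.empty).getD c 0
    = (pvAvail w2 g PySem.Set.empty c : Int) := by
  rw [pv_build]
  unfold pvAvail
  simp [PySem.Set.empty, PySem.Set.contains]

-- ===== VERDICT (by name: the statement is the Claim_ definition above) =====
theorem get_match_pattern_spec : Claim_equal_get_match_pattern := by
  intro word1 word2 _ _
  unfold Spec_get_match_pattern get_match_pattern get_match_pattern_alt
  simp only []
  rw [pv_phase1]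
  exact pv_phase2 word1.toList word2.toList _ _ _ _ _ _ rfl
    (fun c => pv_init word2.toList _ c)
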